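-- pv_equiv track=rewrite | github.com/Madame-Moussi/personal-intelligence-os | workflow_intelligence.py | _parse_fish_history
-- ===== SOURCE A (Python) =====
-- def _parse_fish_history(lines: list[str]) -> list[tuple[int, str]]:
--   rows: list[tuple[int, str]] = []
--   i = 0
--   while i < len(lines):
--     stripped = lines[i].strip()
--     if not stripped.startswith("- cmd:"):
--       i += 1
--       continue
--
--     command = stripped.split(":", 1)[1].strip()
--     when_ts = 0
--     j = i + 1
--     while j < len(lines):
--       probe = lines[j].strip()
--       if probe.startswith("- cmd:"):
--         break
--       if probe.startswith("when:"):
--         raw_ts = probe.split(":", 1)[1].strip()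
--         if raw_ts.isdigit():
--           when_ts = int(raw_ts)
--         break
--       j += 1
--
--     rows.append((when_ts, command))
--     i = j
--
--   return rows
-- ===== SOURCE B (Python) =====
-- def _parse_fish_history(lines: list[str]) -> list[tuple[int, str]]:
--     rows: list[tuple[int, str]] = []
--     current = None
--     when = 0
--     locked = False
--     for line in lines:
--         s = line.strip()
--         if s.startswith("- cmd:"):
--             if current is not None:
--                 rows.append((when, current))
--             current = s.split(":", 1)[1].strip()
--             when = 0
--             locked = False
--         elif s.startswith("when:") and current is not None and not locked:
--             raw = s.split(":", 1)[1].strip()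
--             if raw.isdigit():
--                 when = int(raw)
--             locked = True
--     if current is not None:
--         rows.append((when, current))
--     return rows
-- ===== Notes on version B (the rewrite author's own statement) =====
-- stated objective: simpler
-- what changed: Replaced A's nested while loops with index juggling (inner lookahead scan for 'when:' and i=j resumption) by a single linear pass state machine keeping the pending command, its timestamp and a when-locked flag, flushing on the next cmd line or at end of input.
import Mathlib
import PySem

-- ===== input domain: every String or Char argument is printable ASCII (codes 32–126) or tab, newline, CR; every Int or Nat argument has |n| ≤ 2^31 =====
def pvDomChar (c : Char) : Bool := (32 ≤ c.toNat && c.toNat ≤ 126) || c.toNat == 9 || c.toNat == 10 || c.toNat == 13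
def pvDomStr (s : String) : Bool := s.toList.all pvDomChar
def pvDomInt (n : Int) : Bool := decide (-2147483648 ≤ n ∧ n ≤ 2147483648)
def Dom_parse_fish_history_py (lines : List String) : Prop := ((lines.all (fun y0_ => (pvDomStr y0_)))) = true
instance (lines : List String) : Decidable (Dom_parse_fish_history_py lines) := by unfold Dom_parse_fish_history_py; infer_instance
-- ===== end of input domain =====

-- B replaces A's nested scan-ahead loops by one linear state-machine pass (objective: simpler).

-- shared line helpers (both Pythons classify a stripped line and split it at the first ':'):
-- line.strip().startswith("- cmd:")
def pvIsCmd (l : String) : Bool := PySem.Str.startswith (PySem.Str.strip l) "- cmd:"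
-- line.strip().startswith("when:")
def pvIsWhen (l : String) : Bool := PySem.Str.startswith (PySem.Str.strip l) "when:"
-- line.strip().split(":", 1)[1].strip()  (the [1] index is guarded in both Pythons by a
-- startswith check that guarantees a ':', so the getD defaults are never taken)
def pvAfterColon (l : String) : String :=
  PySem.Str.strip (((PySem.Str.splitMax? (PySem.Str.strip l) ":" 1).getD []).getD 1 "")
-- 'when_ts = int(raw_ts) if raw_ts.isdigit() else <unchanged w>'
def pvTs (l : String) (w : Int) : Int :=
  if PySem.Str.strIsdigit (pvAfterColon l) then (PySem.Int.ofStr? (pvAfterColon l)).getD 0 else w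

-- ===== PORT A =====
-- inner while loop: scan from j for the next '- cmd:' line or the first 'when:' line;
-- returns (final j, when_ts)
def pvAInner (lines : List String) (j : Nat) : Nat × Int :=
  if h : j < lines.length then
    if pvIsCmd lines[j] then (j, 0)
    else if pvIsWhen lines[j] then (j, pvTs lines[j] 0)
    else pvAInner lines (j + 1)
  else (j, 0)
termination_by lines.length - j

theorem pvAInner_ge (lines : List String) (j : Nat) : j ≤ (pvAInner lines j).1 := by
  unfold pvAInner
  split_ifs with h h1 h2
  · exact le_refl j
  · exact le_refl j
  · exact le_trans (Nat.le_succ j) (pvAInner_ge lines (j + 1))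
  · exact le_refl j
termination_by lines.length - j

-- outer while loop of A (i = j resumption after the inner scan)
def pvAOuter (lines : List String) (i : Nat) : List (Int × String) :=
  if h : i < lines.length then
    if pvIsCmd lines[i] then
      ((pvAInner lines (i + 1)).2, pvAfterColon lines[i]) :: pvAOuter lines (pvAInner lines (i + 1)).1
    else pvAOuter lines (i + 1)
  else []
termination_by lines.length - i
decreasing_by
  · have := pvAInner_ge lines (i + 1); omega
  · omega

def parse_fish_history_py (lines : List String) : List (Int × String) :=
  pvAOuter lines 0

-- ===== PORT B =====
-- state = (rows, current command, current when, when_locked)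
def pvBStep (st : List (Int × String) × Option String × Int × Bool) (line : String) :
    List (Int × String) × Option String × Int × Bool :=
  if pvIsCmd line then
    ((match st.2.1 with | some c => st.1 ++ [(st.2.2.1, c)] | none => st.1),
     some (pvAfterColon line), 0, false)
  else if pvIsWhen line && st.2.1.isSome && !st.2.2.2 then
    (st.1, st.2.1, pvTs line st.2.2.1, true)
  else st

def parse_fish_history_py_alt (lines : List String) : List (Int × String) :=
  let st := lines.foldl pvBStep ([], none, 0, false)
  match st.2.1 with
  | some c => st.1 ++ [(st.2.2.1, c)]
  | none => st.1

-- ===== PRECONDITION & SPEC =====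
def Spec_parse_fish_history_py (lines : List String) (out : List (Int × String)) : Prop := out = parse_fish_history_py_alt lines
instance (lines : List String) (out : List (Int × String)) : Decidable (Spec_parse_fish_history_py lines out) := by unfold Spec_parse_fish_history_py; infer_instance

-- ===== CLAIM (what is proved, stated in full; the proofs are below) =====
def Claim_equal_parse_fish_history_py : Prop := ∀ (lines : List String), Dom_parse_fish_history_py lines → Spec_parse_fish_history_py lines (parse_fish_history_py lines)

-- ===== LEMMAS AND PROOFS =====

-- B's end-of-loop flush, as a named function (proof helper)
def pvFlush (st : List (Int × String) × Option String × Int × Bool) : List (Int × String) :=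
  match st.2.1 with
  | some c => st.1 ++ [(st.2.2.1, c)]
  | none => st.1

theorem pvAlt_eq_flush (lines : List String) :
    parse_fish_history_py_alt lines = pvFlush (lines.foldl pvBStep ([], none, 0, false)) := rfl

-- direct-output version of B's state machine (proof helper)
def pvBGo (ls : List String) (cur : Option String) (w : Int) (locked : Bool) : List (Int × String) :=
  match ls with
  | [] => match cur with | some c => [(w, c)] | none => []
  | l :: ls' =>
    if pvIsCmd l then
      (match cur with | some c => [(w, c)] | none => []) ++ pvBGo ls' (some (pvAfterColon l)) 0 false
    else if pvIsWhen l && cur.isSome && !locked then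
      pvBGo ls' cur (pvTs l w) true
    else pvBGo ls' cur w locked

theorem pvB_fold_eq_go (ls : List String) :
    ∀ (rows : List (Int × String)) (cur : Option String) (w : Int) (locked : Bool),
    pvFlush (ls.foldl pvBStep (rows, cur, w, locked)) = rows ++ pvBGo ls cur w locked := by
  induction ls with
  | nil =>
    intro rows cur w locked
    cases cur <;> simp [pvFlush, pvBGo]
  | cons l ls ih =>
    intro rows cur w locked
    simp only [List.foldl_cons, pvBStep, pvBGo]
    by_cases hc : pvIsCmd l = true
    · rw [if_pos hc, if_pos hc]
      cases cur with
      | none => simpa using ih rows (some (pvAfterColon l)) 0 false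
      | some c =>
        rw [ih (rows ++ [(w, c)]) (some (pvAfterColon l)) 0 false]
        simp
    · rw [if_neg hc, if_neg hc]
      by_cases hw : (pvIsWhen l && cur.isSome && !locked) = true
      · rw [if_pos hw, if_pos hw]
        exact ih rows cur (pvTs l w) true
      · rw [if_neg hw, if_neg hw]
        exact ih rows cur w locked

-- once locked, the pending row is already determined
theorem pvBGo_locked (ls : List String) :
    ∀ (c : String) (w : Int), pvBGo ls (some c) w true = (w, c) :: pvBGo ls none 0 false := by
  induction ls with
  | nil => intro c w; simp [pvBGo]
  | cons l ls ih =>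
    intro c w
    simp only [pvBGo, Bool.not_true, Bool.and_false, Bool.false_eq_true, if_false,
      Option.isSome_none, Bool.false_and]
    by_cases hc : pvIsCmd l = true
    · rw [if_pos hc, if_pos hc]
      rfl
    · rw [if_neg hc, if_neg hc]
      rw [ih c w]

-- main correspondence: A's outer loop from index i behaves like B's machine on the dropped
-- suffix with no pending command, and A's inner lookahead with pending command c behaves like
-- B's machine with cur = some c, when = 0, unlocked
theorem pvAB (n : Nat) (lines : List String) :
    (∀ i, lines.length - i ≤ n → pvAOuter lines i = pvBGo (lines.drop i) none 0 false) ∧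
    (∀ i (c : String), lines.length - i ≤ n →
      ((pvAInner lines i).2, c) :: pvAOuter lines (pvAInner lines i).1
        = pvBGo (lines.drop i) (some c) 0 false) := by
  induction n with
  | zero =>
    constructor
    · intro i hi
      have hlen : lines.length ≤ i := by omega
      rw [List.drop_eq_nil_of_le hlen]
      unfold pvAOuter
      simp [Nat.not_lt_of_le hlen, pvBGo]
    · intro i c hi
      have hlen : lines.length ≤ i := by omega
      rw [List.drop_eq_nil_of_le hlen]
      unfold pvAInner pvAOuter
      simp [Nat.not_lt_of_le hlen, pvBGo]
  | succ n ih =>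
    have hP : ∀ i, lines.length - i ≤ n + 1 → pvAOuter lines i = pvBGo (lines.drop i) none 0 false := by
      intro i hi
      by_cases h : i < lines.length
      · rw [List.drop_eq_getElem_cons h]
        rw [pvAOuter.eq_def]
        simp only [h, dif_pos]
        simp only [pvBGo, Option.isSome_none, Bool.and_false, Bool.false_and, Bool.false_eq_true,
          if_false]
        by_cases hc : pvIsCmd lines[i] = true
        · rw [if_pos hc, if_pos hc]
          rw [ih.2 (i + 1) (pvAfterColon lines[i]) (by omega)]
          simp
        · rw [if_neg hc, if_neg hc]
          exact ih.1 (i + 1) (by omega)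
      · have hlen : lines.length ≤ i := by omega
        rw [List.drop_eq_nil_of_le hlen]
        unfold pvAOuter
        simp [Nat.not_lt_of_le hlen, pvBGo]
    refine ⟨hP, ?_⟩
    intro i c hi
    by_cases h : i < lines.length
    · rw [List.drop_eq_getElem_cons h]
      rw [pvAInner.eq_def]
      simp only [h, dif_pos]
      simp only [pvBGo, Option.isSome_some, Bool.not_false, Bool.and_true]
      by_cases hc : pvIsCmd lines[i] = true
      · rw [if_pos hc, if_pos hc]
        have houter : pvAOuter lines i = ((pvAInner lines (i + 1)).2, pvAfterColon lines[i]) ::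
            pvAOuter lines (pvAInner lines (i + 1)).1 := by
          conv_lhs => rw [pvAOuter.eq_def]
          simp [h, hc]
        rw [houter, ih.2 (i + 1) (pvAfterColon lines[i]) (by omega)]
        rfl
      · rw [if_neg hc, if_neg hc]
        have houter : pvAOuter lines i = pvAOuter lines (i + 1) := by
          conv_lhs => rw [pvAOuter.eq_def]
          simp [h, hc]
        by_cases hw : pvIsWhen lines[i] = true
        · rw [if_pos hw, if_pos hw]
          simp only
          rw [houter, hP (i + 1) (by omega)]
          rw [pvBGo_locked]
        · rw [if_neg hw, if_neg hw]
          exact ih.2 (i + 1) c (by omega)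
    · have hlen : lines.length ≤ i := by omega
      rw [List.drop_eq_nil_of_le hlen]
      unfold pvAInner pvAOuter
      simp [Nat.not_lt_of_le hlen, pvBGo]

-- ===== VERDICT (by name: the statement is the Claim_ definition above) =====
theorem parse_fish_history_py_spec : Claim_equal_parse_fish_history_py := by
  intro lines _
  unfold Spec_parse_fish_history_py parse_fish_history_py
  rw [pvAlt_eq_flush, pvB_fold_eq_go lines [] none 0 false, List.nil_append]
  exact (pvAB lines.length lines).1 0 (by omega)
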